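-- pv_equiv track=rewrite | github.com/Arundhati1Sharma/traction-on-demand-on-campus- | largest fibonacci subsequence.py | largestFibonacciSubsequence
-- ===== SOURCE A (Python) =====
-- def largestFibonacciSubsequence(arr):
--     n=len(arr)
--     m= max(arr)
--     new=[]
--     a = 0
--     b = 1
--     hash = []
--     hash.append(a)
--     hash.append(b)
--     while (b < m):
--         c = a + b
--         a = b
--         b = c
--         hash.append(b)
--     for i in range (n):
--         if arr[i] in hash :
--             new.append(arr[i])
--     return(new)
-- ===== SOURCE B (Python) =====
-- def is_fib(n):
--     a, b = 0, 1
--     while a < n: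
--         a, b = b, a + b
--     return a == n
--
-- def largestFibonacciSubsequence(arr):
--     return [x for x in arr if is_fib(x)]
-- ===== Notes on version B (the rewrite author's own statement) =====
-- stated objective: alternative
-- what changed: B replaces A's global precomputed Fibonacci table (built up to max(arr)) plus per-element membership scan by a per-element Fibonacci test that walks the Fibonacci sequence until it reaches the element; no max() and no table.
-- crash fix: On the empty list A raises ValueError (max of empty sequence) while B returns []. — e.g. on largestFibonacciSubsequence([]): A raises ValueError, B returns []
import Mathlib
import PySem

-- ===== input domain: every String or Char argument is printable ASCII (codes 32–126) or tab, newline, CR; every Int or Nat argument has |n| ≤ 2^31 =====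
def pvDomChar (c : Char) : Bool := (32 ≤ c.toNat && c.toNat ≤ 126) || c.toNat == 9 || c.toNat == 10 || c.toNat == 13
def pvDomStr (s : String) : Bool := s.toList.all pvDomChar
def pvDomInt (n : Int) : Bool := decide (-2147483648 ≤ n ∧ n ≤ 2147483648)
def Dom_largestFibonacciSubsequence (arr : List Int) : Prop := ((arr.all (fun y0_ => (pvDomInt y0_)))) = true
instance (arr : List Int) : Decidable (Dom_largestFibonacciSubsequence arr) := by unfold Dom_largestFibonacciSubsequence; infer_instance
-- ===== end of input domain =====

-- B filters each element with a per-element Fibonacci walk instead of A's precomputed table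
-- (built up to max(arr)) and membership scan; on the empty list A raises ValueError, B returns [].

-- ===== PORT A =====
-- the 'while (b < m)' table-building loop; fuel makes it total, m.toNat + 2 iterations always
-- suffice since b after k iterations is the (k+1)-st Fibonacci number ≥ k
def fibTableLoop (fuel : Nat) (a b m : Int) (hash : List Int) : List Int :=
  match fuel with
  | 0 => hash
  | fuel + 1 =>
    if b < m then fibTableLoop fuel b (a + b) m (hash ++ [a + b])
    else hash

def largestFibonacciSubsequence (arr : List Int) : List Int :=
  match PySem.List.max? arr (fun x => x) with
  | none => []   -- Python raises ValueError here; excluded by Pre_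
  | some m =>
    let hash := fibTableLoop (m.toNat + 2) 0 1 m [0, 1]
    arr.foldl (fun new x => if hash.contains x then new ++ [x] else new) []

-- ===== PORT B =====
-- the 'while a < n' walk of is_fib; fuel as above
def isFibLoop (fuel : Nat) (a b n : Int) : Bool :=
  match fuel with
  | 0 => a == n
  | fuel + 1 => if a < n then isFibLoop fuel b (a + b) n else a == n

def isFib (n : Int) : Bool := isFibLoop (n.toNat + 2) 0 1 n

def largestFibonacciSubsequence_alt (arr : List Int) : List Int :=
  arr.filter (fun x => isFib x)

-- ===== PRECONDITION & SPEC =====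
-- Pre_ excludes exactly the empty list, on which Python A raises ValueError (max of empty sequence).
def Pre_largestFibonacciSubsequence (arr : List Int) : Prop := arr ≠ []
instance (arr : List Int) : Decidable (Pre_largestFibonacciSubsequence arr) := by unfold Pre_largestFibonacciSubsequence; infer_instance
def pvWitness_largestFibonacciSubsequence : List Int := [1, 4, 5]

-- On the empty list A raises ValueError (max of empty sequence) while B returns [].
def Raises_largestFibonacciSubsequence (arr : List Int) : Prop := arr = []
instance (arr : List Int) : Decidable (Raises_largestFibonacciSubsequence arr) := by unfold Raises_largestFibonacciSubsequence; infer_instance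
def pvRaiseWitness_largestFibonacciSubsequence : List Int := []
def pvRaiseWitnessOut_largestFibonacciSubsequence : List Int := []

def Spec_largestFibonacciSubsequence (arr : List Int) (out : List Int) : Prop := out = largestFibonacciSubsequence_alt arr
instance (arr : List Int) (out : List Int) : Decidable (Spec_largestFibonacciSubsequence arr out) := by unfold Spec_largestFibonacciSubsequence; infer_instance

-- ===== CLAIM (what is proved, stated in full; the proofs are below) =====
def Claim_equal_largestFibonacciSubsequence : Prop := ∀ (arr : List Int), Dom_largestFibonacciSubsequence arr → Pre_largestFibonacciSubsequence arr → Spec_largestFibonacciSubsequence arr (largestFibonacciSubsequence arr)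
def Claim_raises_largestFibonacciSubsequence : Prop := (∀ (arr : List Int), Dom_largestFibonacciSubsequence arr → Raises_largestFibonacciSubsequence arr → ¬ Pre_largestFibonacciSubsequence arr) ∧ (Dom_largestFibonacciSubsequence (pvRaiseWitness_largestFibonacciSubsequence) ∧ Raises_largestFibonacciSubsequence (pvRaiseWitness_largestFibonacciSubsequence) ∧ largestFibonacciSubsequence_alt (pvRaiseWitness_largestFibonacciSubsequence) = pvRaiseWitnessOut_largestFibonacciSubsequence)

-- ===== LEMMAS AND PROOFS =====

lemma fib_gt_of_ge {n : Int} {k : Nat} (h : n.toNat + 2 ≤ k) : n < (Nat.fib k : Int) := by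
  have h1 := Nat.le_fib_add_one k
  have h2 : n ≤ (n.toNat : Int) := Int.self_le_toNat n
  have h3 : (k : Int) ≤ (Nat.fib k : Int) + 1 := by exact_mod_cast h1
  have h4 : (n.toNat + 2 : Int) ≤ (k : Int) := by exact_mod_cast h
  omega

lemma isFibLoop_main : ∀ (fuel k : Nat) (n : Int),
    (∀ j, j < k → ((Nat.fib j : Int) < n)) → n.toNat + 2 ≤ fuel + k →
    (isFibLoop fuel (Nat.fib k) (Nat.fib (k + 1)) n = true ↔ ∃ j, (Nat.fib j : Int) = n) := by
  intro fuel
  induction fuel with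
  | zero =>
    intro k n hlt hfuel
    simp only [isFibLoop, beq_iff_eq]
    have hgt : n < (Nat.fib k : Int) := fib_gt_of_ge (by omega)
    constructor
    · intro h; omega
    · rintro ⟨j, hj⟩
      by_cases hjk : j < k
      · exact absurd hj (by have := hlt j hjk; omega)
      · have : Nat.fib k ≤ Nat.fib j := Nat.fib_mono (by omega)
        have : (Nat.fib k : Int) ≤ (Nat.fib j : Int) := by exact_mod_cast this
        omega
  | succ fuel ih =>
    intro k n hlt hfuel
    simp only [isFibLoop]
    by_cases hcase : (Nat.fib k : Int) < n
    · rw [if_pos hcase]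
      have hsum : ((Nat.fib k : Int) + (Nat.fib (k + 1) : Int)) = (Nat.fib (k + 2) : Int) := by
        rw [Nat.fib_add_two]; push_cast; ring
      rw [hsum]
      exact ih (k + 1) n
        (fun j hj => by
          rcases Nat.lt_succ_iff_lt_or_eq.mp hj with h | h
          · exact hlt j h
          · subst h; exact hcase)
        (by omega)
    · rw [if_neg hcase]
      simp only [beq_iff_eq]
      constructor
      · intro h; exact ⟨k, h⟩
      · rintro ⟨j, hj⟩
        by_cases hjk : j < k
        · exact absurd hj (by have := hlt j hjk; omega)
        · have : Nat.fib k ≤ Nat.fib j := Nat.fib_mono (by omega)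
          have : (Nat.fib k : Int) ≤ (Nat.fib j : Int) := by exact_mod_cast this
          omega

lemma isFib_iff (n : Int) : isFib n = true ↔ ∃ j, (Nat.fib j : Int) = n := by
  have h := isFibLoop_main (n.toNat + 2) 0 n (fun j hj => absurd hj (by omega)) (by omega)
  simpa [isFib] using h

lemma fibTableLoop_main : ∀ (fuel k : Nat) (m x : Int),
    m.toNat + 2 ≤ fuel + k → x ≤ m →
    (x ∈ fibTableLoop fuel (Nat.fib k) (Nat.fib (k + 1)) m
        ((List.range (k + 2)).map (fun j => (Nat.fib j : Int))) ↔ ∃ j, (Nat.fib j : Int) = x) := by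
  intro fuel
  induction fuel with
  | zero =>
    intro k m x hfuel hx
    simp only [fibTableLoop, List.mem_map, List.mem_range]
    constructor
    · rintro ⟨j, _, hj⟩; exact ⟨j, hj⟩
    · rintro ⟨j, hj⟩
      by_cases hjk : j < k + 2
      · exact ⟨j, hjk, hj⟩
      · have hgt : m < (Nat.fib k : Int) := fib_gt_of_ge (by omega)
        have : Nat.fib k ≤ Nat.fib j := Nat.fib_mono (by omega)
        have : (Nat.fib k : Int) ≤ (Nat.fib j : Int) := by exact_mod_cast this
        omega
  | succ fuel ih =>
    intro k m x hfuel hx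
    simp only [fibTableLoop]
    by_cases hcase : (Nat.fib (k + 1) : Int) < m
    · rw [if_pos hcase]
      have hsum : ((Nat.fib k : Int) + (Nat.fib (k + 1) : Int)) = (Nat.fib (k + 2) : Int) := by
        rw [Nat.fib_add_two]; push_cast; ring
      have hacc : (List.range (k + 2)).map (fun j => (Nat.fib j : Int)) ++ [((Nat.fib k : Int) + (Nat.fib (k + 1) : Int))]
          = (List.range (k + 1 + 2)).map (fun j => (Nat.fib j : Int)) := by
        rw [hsum, show k + 1 + 2 = (k + 2) + 1 from rfl, List.range_succ, List.map_append]
        simp [List.range_succ]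
      rw [hacc, hsum]
      exact ih (k + 1) m x (by omega) hx
    · rw [if_neg hcase]
      simp only [List.mem_map, List.mem_range]
      constructor
      · rintro ⟨j, _, hj⟩; exact ⟨j, hj⟩
      · rintro ⟨j, hj⟩
        by_cases hjk : j < k + 2
        · exact ⟨j, hjk, hj⟩
        · have : Nat.fib (k + 1) ≤ Nat.fib j := Nat.fib_mono (by omega)
          have : (Nat.fib (k + 1) : Int) ≤ (Nat.fib j : Int) := by exact_mod_cast this
          have : (Nat.fib (k + 1) : Int) = x := by omega
          exact ⟨k + 1, by omega, this⟩

lemma hash_iff (m x : Int) (hx : x ≤ m) :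
    x ∈ fibTableLoop (m.toNat + 2) 0 1 m [0, 1] ↔ ∃ j, (Nat.fib j : Int) = x := by
  have h := fibTableLoop_main (m.toNat + 2) 0 m x (by omega) hx
  simpa [List.range_succ] using h

-- ===== VERDICT (by name: the statement is the Claim_ definition above) =====
theorem largestFibonacciSubsequence_spec : Claim_equal_largestFibonacciSubsequence := by
  intro arr _ hpre
  unfold Spec_largestFibonacciSubsequence largestFibonacciSubsequence largestFibonacciSubsequence_alt
  cases hmax : PySem.List.max? arr (fun x => x) with
  | none => exact absurd (((PySem.List.max?_eq_none_iff arr (fun x => x)).mp hmax)) hpre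
  | some m =>
    simp only []
    rw [PySem.List.foldl_append_if_eq_filter]
    rw [List.nil_append]
    apply List.filter_congr
    intro x hxmem
    have hxm : x ≤ m := PySem.List.max?_isMax hmax x hxmem
    have h1 := hash_iff m x hxm
    have h2 := isFib_iff x
    have hc : (fibTableLoop (m.toNat + 2) 0 1 m [0, 1]).contains x = true
        ↔ x ∈ fibTableLoop (m.toNat + 2) 0 1 m [0, 1] := by
      simp
    cases hb : (fibTableLoop (m.toNat + 2) 0 1 m [0, 1]).contains x with
    | true => exact (((isFib_iff x).mpr (h1.mp (hc.mp hb)))).symm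
    | false =>
      cases hb2 : isFib x with
      | false => rfl
      | true =>
        have := hc.mpr (h1.mpr ((isFib_iff x).mp hb2))
        rw [hb] at this
        exact absurd this (by simp)

@[simp] theorem largestFibonacciSubsequence_raises : Claim_raises_largestFibonacciSubsequence := by
  unfold Claim_raises_largestFibonacciSubsequence
  exact ⟨fun arr _ hr hp => hp hr, by decide⟩
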